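-- pv_equiv track=rewrite | github.com/zeranlin/compliance-wiki | scripts/validate_checkpoint_cli.py | split_markdown_table_row
-- ===== SOURCE A (Python) =====
-- def split_markdown_table_row(line: str) -> list[str]:
--     stripped = line.strip()
--     if stripped.startswith("|"):
--         stripped = stripped[1:]
--     if stripped.endswith("|"):
--         stripped = stripped[:-1]
--     cells: list[str] = []
--     current: list[str] = []
--     wikilink_depth = 0
--     idx = 0
--     while idx < len(stripped):
--         char = stripped[idx]
--         pair = stripped[idx : idx + 2]
--         if pair == "[[":
--             wikilink_depth += 1
--             current.append(pair)
--             idx += 2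
--             continue
--         if pair == "]]" and wikilink_depth:
--             wikilink_depth -= 1
--             current.append(pair)
--             idx += 2
--             continue
--         if char == "|" and wikilink_depth == 0:
--             cells.append("".join(current).strip())
--             current = []
--             idx += 1
--             continue
--         current.append(char)
--         idx += 1
--     cells.append("".join(current).strip())
--     return cells
-- ===== SOURCE B (Python) =====
-- def split_markdown_table_row(line: str) -> list[str]:
--     stripped = line.strip()
--     if stripped.startswith("|"):
--         stripped = stripped[1:]
--     if stripped.endswith("|"):
--         stripped = stripped[:-1]
--     parts = stripped.split("|")
--     cells: list[str] = []
--     acc = ""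
--     depth = 0
--     for k, part in enumerate(parts):
--         acc += part
--         if k == len(parts) - 1:
--             # last fragment: always closes the final cell
--             cells.append(acc.strip())
--         else:
--             # update wikilink depth by scanning this fragment
--             i = 0
--             while i < len(part):
--                 if part[i : i + 2] == "[[":
--                     depth += 1
--                     i += 2
--                 elif part[i : i + 2] == "]]" and depth:
--                     depth -= 1
--                     i += 2
--                 else:
--                     i += 1
--             if depth == 0:
--                 cells.append(acc.strip())
--                 acc = ""
--             else:
--                 acc += "|"  # the '|' was inside a wikilink: keep it literally
--     return cells
-- ===== Notes on version B (the rewrite author's own statement) =====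
-- stated objective: faster
-- what changed: Replaces A's single character-indexed while loop (which builds each cell char by char, deciding at every pipe whether the wikilink depth is zero) by a split-then-merge decomposition: B splits the stripped row on the pipe separator once with str.split, then walks the fragments, updating the wikilink depth per fragment and either emitting the accumulated cell or re-joining fragments with a literal pipe while inside a wikilink.
import Mathlib
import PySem

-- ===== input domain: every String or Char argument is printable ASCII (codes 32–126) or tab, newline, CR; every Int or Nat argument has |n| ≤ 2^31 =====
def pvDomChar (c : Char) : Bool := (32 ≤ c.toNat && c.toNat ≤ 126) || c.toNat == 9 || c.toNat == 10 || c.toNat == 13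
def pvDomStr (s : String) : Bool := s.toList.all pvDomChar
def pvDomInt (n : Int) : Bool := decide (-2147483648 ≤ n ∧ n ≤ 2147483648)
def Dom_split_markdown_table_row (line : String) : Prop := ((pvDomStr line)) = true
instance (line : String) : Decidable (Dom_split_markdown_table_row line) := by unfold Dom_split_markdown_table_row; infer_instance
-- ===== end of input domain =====

-- B replaces A's single character-indexed scan by split-on-'|' followed by a
-- depth-driven merge of the fragments (objective: faster by a constant factor, measured).

-- ===== PORT A =====
-- A's while loop over `stripped`: char/pair checks in A's order; `current`/`cells` as in A.
def pvALoop : List Char → Int → List Char → List String → List String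
  | [], _, current, cells => cells ++ [String.ofList (PySem.Chars.strip current)]
  | c :: rest, depth, current, cells =>
    if c = '[' ∧ rest.head? = some '[' then
      pvALoop rest.tail (depth + 1) (current ++ ['[', '[']) cells
    else if c = ']' ∧ rest.head? = some ']' ∧ depth ≠ 0 then
      pvALoop rest.tail (depth - 1) (current ++ [']', ']']) cells
    else if c = '|' ∧ depth = 0 then
      pvALoop rest depth [] (cells ++ [String.ofList (PySem.Chars.strip current)])
    else
      pvALoop rest depth (current ++ [c]) cells
  termination_by cs => cs.length
  decreasing_by all_goals simp [List.length_tail]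

def split_markdown_table_row (line : String) : List String :=
  let stripped0 := PySem.Chars.strip line.toList
  let stripped1 := if PySem.Chars.startswith stripped0 ['|'] then PySem.List.slice stripped0 (some 1) none else stripped0
  let stripped2 := if PySem.Chars.endswith stripped1 ['|'] then PySem.List.slice stripped1 none (some (-1)) else stripped1
  pvALoop stripped2 0 [] []

-- ===== PORT B =====
-- B's inner while loop: update the wikilink depth by scanning one fragment (no '|' inside).
def pvBScan : List Char → Int → Int
  | [], depth => depth
  | c :: rest, depth =>
    if c = '[' ∧ rest.head? = some '[' then
      pvBScan rest.tail (depth + 1)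
    else if c = ']' ∧ rest.head? = some ']' ∧ depth ≠ 0 then
      pvBScan rest.tail (depth - 1)
    else
      pvBScan rest depth
  termination_by cs => cs.length
  decreasing_by all_goals simp [List.length_tail]

-- B's for loop over the fragments of stripped.split('|'), carrying (acc, depth);
-- the last fragment always closes the final cell.
def pvBMerge : List (List Char) → Int → List Char → List String
  | [], _, _ => []
  | [p], _, acc => [String.ofList (PySem.Chars.strip (acc ++ p))]
  | p :: ps, depth, acc =>
    let depth' := pvBScan p depth
    if depth' = 0 then
      String.ofList (PySem.Chars.strip (acc ++ p)) :: pvBMerge ps 0 []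
    else
      pvBMerge ps depth' (acc ++ p ++ ['|'])

def split_markdown_table_row_alt (line : String) : List String :=
  let stripped0 := PySem.Chars.strip line.toList
  let stripped1 := if PySem.Chars.startswith stripped0 ['|'] then PySem.List.slice stripped0 (some 1) none else stripped0
  let stripped2 := if PySem.Chars.endswith stripped1 ['|'] then PySem.List.slice stripped1 none (some (-1)) else stripped1
  pvBMerge (List.splitOn '|' stripped2) 0 []

-- ===== PRECONDITION & SPEC =====
def Spec_split_markdown_table_row (line : String) (out : List String) : Prop := out = split_markdown_table_row_alt line
instance (line : String) (out : List String) : Decidable (Spec_split_markdown_table_row line out) := by unfold Spec_split_markdown_table_row; infer_instance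

-- ===== CLAIM (what is proved, stated in full; the proofs are below) =====
def Claim_equal_split_markdown_table_row : Prop := ∀ (line : String), Dom_split_markdown_table_row line → Spec_split_markdown_table_row line (split_markdown_table_row line)

-- ===== LEMMAS AND PROOFS =====

-- splitOn '|' never returns [].
lemma pvSplitOn_ne_nil (r : List Char) : List.splitOn '|' r ≠ [] := by
  simpa [List.splitOn] using List.splitOnP_ne_nil (fun x => x == '|') r

lemma pvSplitOn_pipe (r : List Char) :
    List.splitOn '|' ('|' :: r) = [] :: List.splitOn '|' r := by
  simp [List.splitOn, List.splitOnP_cons]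

lemma pvSplitOn_cons (c : Char) (hc : c ≠ '|') (r : List Char) :
    List.splitOn '|' (c :: r) =
      (c :: (List.splitOn '|' r).headI) :: (List.splitOn '|' r).tail := by
  rcases hr : List.splitOn '|' r with _ | ⟨h, t⟩
  · exact absurd hr (pvSplitOn_ne_nil r)
  · simp only [List.splitOn, List.splitOnP_cons] at hr ⊢
    rw [hr]
    simp [hc]

-- a fragment's first char is the first char of the rest of the input
lemma pvSplitOn_head_head (r : List Char) (x : Char)
    (h : ((List.splitOn '|' r).headI).head? = some x) : r.head? = some x := by
  rcases r with _ | ⟨c, r'⟩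
  · simp [List.splitOn, List.headI] at h
  · by_cases hc : c = '|'
    · subst hc; simp [pvSplitOn_pipe] at h
    · rw [pvSplitOn_cons c hc r'] at h
      simp only [List.headI, List.head?_cons, Option.some.injEq] at h ⊢
      exact h

-- pvBMerge only looks at a leading fragment through pvBScan and concatenation
lemma pvBMerge_shift (x p : List Char) (ps : List (List Char)) (d d' : Int) (acc : List Char)
    (hscan : pvBScan (x ++ p) d = pvBScan p d') :
    pvBMerge ((x ++ p) :: ps) d acc = pvBMerge (p :: ps) d' (acc ++ x) := by
  rcases ps with _ | ⟨q, qs⟩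
  · simp [pvBMerge, List.append_assoc]
  · simp only [pvBMerge, hscan, List.append_assoc]

lemma pvBScan_nil (d : Int) : pvBScan [] d = d := by simp [pvBScan]

-- the main loop correspondence: A's scan = B's split-then-merge
lemma pvMain (cs : List Char) (d : Int) (cur : List Char) (cells : List String) :
    pvALoop cs d cur cells = cells ++ pvBMerge (List.splitOn '|' cs) d cur := by
  fun_induction pvALoop cs d cur cells with
  | case1 d cur cells =>
      simp [List.splitOn, pvBMerge]
  | case2 c rest d cur cells hcond ih =>
      obtain ⟨hc, hh⟩ := hcond
      subst hc
      rcases rest with _ | ⟨y, r'⟩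
      · simp at hh
      · simp only [List.head?_cons, Option.some.injEq] at hh
        subst hh
        rw [pvSplitOn_cons '[' (by decide) ('[' :: r'),
            pvSplitOn_cons '[' (by decide) r']
        rcases hr : List.splitOn '|' r' with _ | ⟨h, t⟩
        · exact absurd hr (pvSplitOn_ne_nil r')
        · simp only [hr, List.headI, List.tail] at ih ⊢
          have hx : pvBScan ('[' :: '[' :: h) d = pvBScan h (d + 1) := by
            rw [pvBScan]; simp
          rw [show ('[' :: '[' :: h) = ['[', '['] ++ h from rfl,
              pvBMerge_shift ['[', '['] h t d (d + 1) cur (by simpa using hx)]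
          simpa using ih
  | case3 c rest d cur cells hnot hcond ih =>
      obtain ⟨hc, hh, hd⟩ := hcond
      subst hc
      rcases rest with _ | ⟨y, r'⟩
      · simp at hh
      · simp only [List.head?_cons, Option.some.injEq] at hh
        subst hh
        rw [pvSplitOn_cons ']' (by decide) (']' :: r'),
            pvSplitOn_cons ']' (by decide) r']
        rcases hr : List.splitOn '|' r' with _ | ⟨h, t⟩
        · exact absurd hr (pvSplitOn_ne_nil r')
        · simp only [hr, List.headI, List.tail] at ih ⊢
          have hx : pvBScan (']' :: ']' :: h) d = pvBScan h (d - 1) := by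
            rw [pvBScan]; simp [hd]
          rw [show (']' :: ']' :: h) = [']', ']'] ++ h from rfl,
              pvBMerge_shift [']', ']'] h t d (d - 1) cur (by simpa using hx)]
          simpa using ih
  | case4 c rest d cur cells hnot1 hnot2 hcond ih =>
      obtain ⟨hc, hd⟩ := hcond
      subst hc hd
      rw [pvSplitOn_pipe rest]
      rcases hr : List.splitOn '|' rest with _ | ⟨h, t⟩
      · exact absurd hr (pvSplitOn_ne_nil rest)
      · simp only [hr] at ih ⊢
        rw [show pvBMerge ([] :: h :: t) 0 cur =
              String.ofList (PySem.Chars.strip (cur ++ [])) :: pvBMerge (h :: t) 0 [] by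
            simp [pvBMerge, pvBScan_nil]]
        simp only [List.append_nil]
        rw [ih]
        simp
  | case5 c rest d cur cells hnot1 hnot2 hnot3 ih =>
      by_cases hc : c = '|'
      · -- '|' inside a wikilink: depth ≠ 0
        subst hc
        have hd : d ≠ 0 := fun h => hnot3 ⟨rfl, h⟩
        rw [pvSplitOn_pipe rest]
        rcases hr : List.splitOn '|' rest with _ | ⟨h, t⟩
        · exact absurd hr (pvSplitOn_ne_nil rest)
        · simp only [hr] at ih ⊢
          rw [show pvBMerge ([] :: h :: t) d cur = pvBMerge (h :: t) d (cur ++ [] ++ ['|']) by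
              simp only [pvBMerge, pvBScan_nil, if_neg hd]]
          simpa using ih
      · rw [pvSplitOn_cons c hc rest]
        rcases hr : List.splitOn '|' rest with _ | ⟨h, t⟩
        · exact absurd hr (pvSplitOn_ne_nil rest)
        · simp only [hr, List.headI, List.tail_cons] at ih ⊢
          have hx : pvBScan (c :: h) d = pvBScan h d := by
            rw [pvBScan]
            have h1 : ¬(c = '[' ∧ h.head? = some '[') := by
              rintro ⟨rfl, hhd⟩
              exact hnot1 ⟨rfl, pvSplitOn_head_head rest '[' (by simp [hr, hhd])⟩
            have h2 : ¬(c = ']' ∧ h.head? = some ']' ∧ d ≠ 0) := by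
              rintro ⟨rfl, hhd, hdne⟩
              exact hnot2 ⟨rfl, pvSplitOn_head_head rest ']' (by simp [hr, hhd]), hdne⟩
            simp only [if_neg h1, if_neg h2]
          rw [show (c :: h) = [c] ++ h from rfl, pvBMerge_shift [c] h t d d cur (by simpa using hx)]
          simpa using ih

-- ===== VERDICT (by name: the statement is the Claim_ definition above) =====
theorem split_markdown_table_row_spec : Claim_equal_split_markdown_table_row := by
  intro line _
  unfold Spec_split_markdown_table_row split_markdown_table_row split_markdown_table_row_alt
  exact pvMain _ 0 [] []
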